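-- pv_equiv track=rewrite | github.com/dragonier23/CP | projecteuler/problem46.py | oddlist
-- ===== SOURCE A (Python) =====
-- import math
--
-- def isprime(num):
--     for i in range(2, int(math.sqrt(num)) + 1):
--         if num%i == 0:
--             return False
--     return True
--
-- def oddlist(num):
--     list = [[],[]]
--     for i in range(1, num, 2):
--         if isprime(i):
--             list[0].append(i)
--         else:
--             list[1].append(i)
--     return list
-- ===== SOURCE B (Python) =====
-- def oddlist(num):
--     # Sieve: mark every odd multiple m >= p*p of every odd p with p*p < num,
--     # then classify the odd numbers below num by membership in the marked set.
--     marked = set()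
--     p = 3
--     while p * p < num:
--         marked.update(range(p * p, num, 2 * p))
--         p += 2
--     primes, composites = [], []
--     for i in range(1, num, 2):
--         if i in marked:
--             composites.append(i)
--         else:
--             primes.append(i)
--     return [primes, composites]
-- ===== Notes on version B (the rewrite author's own statement) =====
-- stated objective: faster
-- what changed: Per-number trial division up to sqrt(i) is replaced by a sieve that marks the odd multiples m >= p*p of each odd p with p*p < num into a set once, then classifies each odd number by set membership (1 stays in the prime list, as in A).
import Mathlib
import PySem

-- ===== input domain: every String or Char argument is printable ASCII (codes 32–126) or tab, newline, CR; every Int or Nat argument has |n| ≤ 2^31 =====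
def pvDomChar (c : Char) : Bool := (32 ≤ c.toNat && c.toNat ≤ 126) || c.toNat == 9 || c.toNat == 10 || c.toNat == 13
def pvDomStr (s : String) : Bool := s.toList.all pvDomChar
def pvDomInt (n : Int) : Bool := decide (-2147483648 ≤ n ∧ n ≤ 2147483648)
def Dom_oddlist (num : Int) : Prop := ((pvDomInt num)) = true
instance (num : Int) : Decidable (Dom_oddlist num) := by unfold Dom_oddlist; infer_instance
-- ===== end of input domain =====

-- B replaces per-number trial division (O(n^1.5)) by a set-based sieve marking odd multiples once (faster, asymptotic).

-- ===== PORT A =====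
-- 'for i in range(2, int(math.sqrt(num)) + 1): if num % i == 0: return False' ; 'return True' after the loop.
def isprimeLoop (n : Int) : List Int → Bool
  | [] => true
  | i :: rest => if PySem.Int.mod n i == 0 then false else isprimeLoop n rest

-- int(math.sqrt(num)) is ported as Nat.sqrt num.toNat: exact for 0 ≤ num ≤ 2^31 (double sqrt
-- cannot cross an integer boundary there); oddlist only calls isprime on 1 ≤ num.
def isprime (num : Int) : Bool :=
  isprimeLoop num (PySem.List.pyRange 2 ((Nat.sqrt num.toNat : Int) + 1) 1)

def oddlist (num : Int) : List (List Int) :=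
  let r := (PySem.List.pyRange 1 num 2).foldl
    (fun (acc : List Int × List Int) i =>
      if isprime i then (acc.1 ++ [i], acc.2) else (acc.1, acc.2 ++ [i]))
    ([], [])
  [r.1, r.2]

-- ===== PORT B =====
-- 'while p * p < num: marked.update(range(p*p, num, 2*p)); p += 2'
def markLoop (num p : Int) (s : PySem.Set Int) : PySem.Set Int :=
  if p * p < num then
    markLoop num (p + 2) (PySem.Set.update s (PySem.List.pyRange (p * p) num (2 * p)))
  else s
  termination_by (num - p).toNat
  decreasing_by
    have hp : p ≤ p * p := by rcases le_total p 0 with h | h <;> nlinarith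
    omega

def oddlist_alt (num : Int) : List (List Int) :=
  let marked := markLoop num 3 PySem.Set.empty
  let r := (PySem.List.pyRange 1 num 2).foldl
    (fun (acc : List Int × List Int) i =>
      if PySem.Set.contains marked i then (acc.1, acc.2 ++ [i]) else (acc.1 ++ [i], acc.2))
    ([], [])
  [r.1, r.2]

-- ===== PRECONDITION & SPEC =====
def Spec_oddlist (num : Int) (out : List (List Int)) : Prop := out = oddlist_alt num
instance (num : Int) (out : List (List Int)) : Decidable (Spec_oddlist num out) := by unfold Spec_oddlist; infer_instance

-- ===== CLAIM (what is proved, stated in full; the proofs are below) =====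
def Claim_equal_oddlist : Prop := ∀ (num : Int), Dom_oddlist num → Spec_oddlist num (oddlist num)

-- ===== LEMMAS AND PROOFS =====

theorem isprimeLoop_eq_false_iff (n : Int) (l : List Int) :
    isprimeLoop n l = false ↔ ∃ m ∈ l, PySem.Int.mod n m = 0 := by
  induction l with
  | nil => simp [isprimeLoop]
  | cons i rest ih =>
    simp only [isprimeLoop]
    split_ifs with h
    · simp only [beq_iff_eq] at h
      simp [h]
    · simp only [beq_iff_eq] at h
      simp only [List.mem_cons, ih]
      constructor
      · rintro ⟨m, hm, hmod⟩; exact ⟨m, Or.inr hm, hmod⟩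
      · rintro ⟨m, hm | hm, hmod⟩
        · exact absurd (hm ▸ hmod) h
        · exact ⟨m, hm, hmod⟩

-- A's primality test, characterised: for 1 ≤ i it fails exactly on a divisor m with m*m ≤ i.
theorem isprime_eq_false_iff (i : Int) (hi : 1 ≤ i) :
    isprime i = false ↔ ∃ m : Int, 2 ≤ m ∧ m * m ≤ i ∧ m ∣ i := by
  have hsqrt : ∀ m : Int, 0 ≤ m → (m ≤ (Nat.sqrt i.toNat : Int) ↔ m * m ≤ i) := by
    intro m h0
    have e1 : ((m.toNat : Int)) = m := Int.toNat_of_nonneg h0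
    have e2 : ((i.toNat : Int)) = i := Int.toNat_of_nonneg (by omega)
    constructor
    · intro h
      have h' : m.toNat ≤ Nat.sqrt i.toNat := by omega
      have := Nat.le_sqrt.mp h'
      calc m * m = (m.toNat : Int) * (m.toNat : Int) := by rw [e1]
        _ ≤ (i.toNat : Int) := by exact_mod_cast this
        _ = i := e2
    · intro h
      have h' : m.toNat * m.toNat ≤ i.toNat := by
        have : ((m.toNat * m.toNat : Nat) : Int) ≤ ((i.toNat : Nat) : Int) := by
          push_cast; rw [e1, e2]; exact h
        exact_mod_cast this
      have := Nat.le_sqrt.mpr h'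
      omega
  rw [isprime, isprimeLoop_eq_false_iff]
  constructor
  · rintro ⟨m, hm, hmod⟩
    rw [PySem.List.mem_pyRange_one] at hm
    exact ⟨m, hm.1, (hsqrt m (by omega)).mp (by omega),
      (PySem.Int.mod_eq_zero_iff_dvd i m).mp hmod⟩
  · rintro ⟨m, h2, hsq, hdvd⟩
    refine ⟨m, ?_, (PySem.Int.mod_eq_zero_iff_dvd i m).mpr hdvd⟩
    rw [PySem.List.mem_pyRange_one]
    have := (hsqrt m (by omega)).mpr hsq
    omega

-- Membership in B's marked set after the while loop, for a start value p ≥ 3.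
theorem mem_markLoop (num p : Int) (s : PySem.Set Int) (hp : 3 ≤ p) (x : Int) :
    x ∈ markLoop num p s ↔
      x ∈ s ∨ ∃ q, p ≤ q ∧ 2 ∣ q - p ∧ q * q < num ∧ x ∈ PySem.List.pyRange (q * q) num (2 * q) := by
  by_cases h : p * p < num
  · rw [markLoop, if_pos h,
      mem_markLoop num (p + 2) (PySem.Set.update s (PySem.List.pyRange (p * p) num (2 * p)))
        (by omega) x,
      PySem.Set.mem_update]
    constructor
    · rintro (((hs | hr) | ⟨q, hq1, hq2, hq3, hq4⟩))
      · exact Or.inl hs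
      · exact Or.inr ⟨p, le_refl p, ⟨0, by ring⟩, h, hr⟩
      · exact Or.inr ⟨q, by omega, by omega, hq3, hq4⟩
    · rintro (hs | ⟨q, hq1, hq2, hq3, hq4⟩)
      · exact Or.inl (Or.inl hs)
      · by_cases hqp : q = p
        · exact Or.inl (Or.inr (by rw [← hqp]; exact hq4))
        · exact Or.inr ⟨q, by omega, by omega, hq3, hq4⟩
  · rw [markLoop, if_neg h]
    constructor
    · exact Or.inl
    · rintro (hs | ⟨q, hq1, _, hq3, _⟩)
      · exact hs
      · exact absurd hq3 (by nlinarith)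
  termination_by (num - p).toNat
  decreasing_by
    have hpp : p ≤ p * p := by rcases le_total p 0 with h' | h' <;> nlinarith [h']
    omega

-- The two tests agree on every odd 1 ≤ i < num.
theorem contains_eq_not_isprime (num i : Int) (h1 : 1 ≤ i) (h2 : i < num) (hodd : 2 ∣ i - 1) :
    PySem.Set.contains (markLoop num 3 PySem.Set.empty) i = !isprime i := by
  have hmem : i ∈ markLoop num 3 PySem.Set.empty ↔ isprime i = false := by
    rw [mem_markLoop num 3 PySem.Set.empty (le_refl 3) i, isprime_eq_false_iff i h1]
    constructor
    · rintro (hs | ⟨q, hq3, _, _, hr⟩)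
      · exact absurd hs (by simp [PySem.Set.empty])
      · rw [PySem.List.mem_pyRange_iff_of_pos (by omega)] at hr
        obtain ⟨hlo, _, t, ht⟩ := hr
        exact ⟨q, by omega, hlo, ⟨q + 2 * t, by linarith [ht]⟩⟩
    · rintro ⟨m, hm2, hmsq, hmdvd⟩
      obtain ⟨c, hc⟩ := hmdvd
      have hmodd : ¬ (2 ∣ m) := by
        intro h2m
        have : (2 : Int) ∣ i := dvd_trans h2m ⟨c, hc⟩
        omega
      have hcodd : ¬ (2 ∣ c) := by
        intro h2c
        have : (2 : Int) ∣ i := by rw [hc]; exact Dvd.dvd.mul_left h2c m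
        omega
      have hmc : m ≤ c := by nlinarith
      obtain ⟨t, ht⟩ : (2 : Int) ∣ c - m := by omega
      refine Or.inr ⟨m, by omega, by omega, by omega, ?_⟩
      rw [PySem.List.mem_pyRange_iff_of_pos (by omega)]
      exact ⟨hmsq, h2, t, by linear_combination hc + m * ht⟩
  cases hA : isprime i with
  | true =>
    simp only [Bool.not_true]
    rw [← Bool.not_eq_true, PySem.Set.contains_iff]
    intro hin
    exact absurd (hmem.mp hin) (by simp [hA])
  | false =>
    simp only [Bool.not_false]
    rw [PySem.Set.contains_iff]
    exact hmem.mpr hA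

-- ===== VERDICT (by name: the statement is the Claim_ definition above) =====
theorem oddlist_spec : Claim_equal_oddlist := by
  intro num _
  unfold Spec_oddlist oddlist oddlist_alt
  simp only []
  have := PySem.List.foldl_congr_mem (PySem.List.pyRange 1 num 2)
    (fun (acc : List Int × List Int) i =>
      if isprime i then (acc.1 ++ [i], acc.2) else (acc.1, acc.2 ++ [i]))
    (fun (acc : List Int × List Int) i =>
      if PySem.Set.contains (markLoop num 3 PySem.Set.empty) i then (acc.1, acc.2 ++ [i])
      else (acc.1 ++ [i], acc.2))
    ([], [])
    (by
      intro acc x hx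
      rw [PySem.List.mem_pyRange_iff_of_pos (by omega)] at hx
      dsimp only
      rw [contains_eq_not_isprime num x (by omega) hx.2.1 hx.2.2]
      cases isprime x <;> simp)
  rw [this]
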